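-- pv_equiv track=rewrite | github.com/cdgtlmda/SentinelOps | scripts/operations/verify_apis.py | check_api_status
-- ===== SOURCE A (Python) =====
-- from typing import List, Dict, Tuple
--
-- def check_api_status(enabled_apis: set, api_dict: Dict[str, dict], api_type: str) -> Tuple[List[str], List[str], List[str]]:
--     """Check status of APIs and categorize them."""
--     enabled = []
--     disabled_no_billing = []
--     disabled_billing_ok = []
--
--     for api_id, api_info in api_dict.items():
--         if api_id in enabled_apis:
--             enabled.append(api_id)
--         elif api_info["billing_required"]:
--             disabled_no_billing.append(api_id)
--         else:
--             disabled_billing_ok.append(api_id)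
--
--     return enabled, disabled_no_billing, disabled_billing_ok
-- ===== SOURCE B (Python) =====
-- def _split(items, pred):
--     """Stable two-way split: (matches, non-matches)."""
--     yes, no = [], []
--     for x in items:
--         (yes if pred(x) else no).append(x)
--     return yes, no
--
--
-- def check_api_status(enabled_apis, api_dict, api_type):
--     """Check status of APIs and categorize them (two-stage partition)."""
--     # Stage 1: split the items by membership only; billing is never consulted here.
--     enabled_items, disabled_items = _split(api_dict.items(),
--                                            lambda item: item[0] in enabled_apis)
--     # Stage 2: split only the disabled items by their billing flag.
--     no_billing, billing_ok = _split(disabled_items,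
--                                     lambda item: item[1]["billing_required"])
--     return ([api_id for api_id, _ in enabled_items],
--             [api_id for api_id, _ in no_billing],
--             [api_id for api_id, _ in billing_ok])
-- ===== Notes on version B (the rewrite author's own statement) =====
-- stated objective: alternative
-- what changed: Replaces A's single fused three-way classification loop by a staged decomposition: a generic stable two-way split is applied twice -- first splitting items by membership in enabled_apis (never touching billing), then splitting only the disabled items by billing_required -- with the ids projected out at the end.
import Mathlib
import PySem

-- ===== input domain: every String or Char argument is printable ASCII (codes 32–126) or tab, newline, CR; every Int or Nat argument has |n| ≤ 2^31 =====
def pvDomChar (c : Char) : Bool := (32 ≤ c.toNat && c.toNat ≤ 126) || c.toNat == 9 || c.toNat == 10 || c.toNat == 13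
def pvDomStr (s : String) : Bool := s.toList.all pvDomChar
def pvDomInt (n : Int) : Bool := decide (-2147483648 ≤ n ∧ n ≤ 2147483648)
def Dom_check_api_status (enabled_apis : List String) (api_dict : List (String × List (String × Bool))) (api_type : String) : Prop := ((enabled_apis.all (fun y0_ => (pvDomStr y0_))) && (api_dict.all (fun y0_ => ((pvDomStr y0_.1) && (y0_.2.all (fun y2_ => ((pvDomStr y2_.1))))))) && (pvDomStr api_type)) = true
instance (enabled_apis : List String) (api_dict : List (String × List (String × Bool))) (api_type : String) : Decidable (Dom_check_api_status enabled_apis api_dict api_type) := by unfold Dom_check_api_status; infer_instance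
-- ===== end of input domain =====

-- B replaces A's fused three-way classification loop by two staged stable two-way splits (membership first, billing only on the disabled remainder); alternative decomposition, no speed claim.

-- ===== PORT A =====
-- api_info["billing_required"]: first-match lookup in the association list; none = KeyError, excluded by Pre_.
def pvBilling (info : List (String × Bool)) : Option Bool := (PySem.Dict.mk info).get? "billing_required"

def check_api_status (enabled_apis : List String) (api_dict : List (String × List (String × Bool))) (api_type : String) : List String × List String × List String :=
  api_dict.foldl (fun acc p =>
    if enabled_apis.contains p.1 then (acc.1 ++ [p.1], acc.2.1, acc.2.2)
    else if (pvBilling p.2).getD false then (acc.1, acc.2.1 ++ [p.1], acc.2.2)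
    else (acc.1, acc.2.1, acc.2.2 ++ [p.1])) ([], [], [])

-- ===== PORT B =====
-- _split: stable two-way split written as the loop in Source B (append to yes/no accumulators).
def pvSplit {α : Type} (items : List α) (pred : α → Bool) : List α × List α :=
  items.foldl (fun acc x => if pred x then (acc.1 ++ [x], acc.2) else (acc.1, acc.2 ++ [x])) ([], [])

def check_api_status_alt (enabled_apis : List String) (api_dict : List (String × List (String × Bool))) (api_type : String) : List String × List String × List String :=
  let stage1 := pvSplit api_dict (fun item => enabled_apis.contains item.1)
  let stage2 := pvSplit stage1.2 (fun item => (pvBilling item.2).getD false)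
  (stage1.1.map (·.1), stage2.1.map (·.1), stage2.2.map (·.1))

-- ===== PRECONDITION & SPEC =====
-- Pre_ excludes exactly the inputs where Python A raises KeyError: a non-enabled api whose info dict lacks "billing_required" (Python B raises there too).
def Pre_check_api_status (enabled_apis : List String) (api_dict : List (String × List (String × Bool))) (api_type : String) : Prop :=
  ∀ p ∈ api_dict, enabled_apis.contains p.1 = true ∨ ((PySem.Dict.mk p.2).get? "billing_required").isSome = true
instance (enabled_apis : List String) (api_dict : List (String × List (String × Bool))) (api_type : String) : Decidable (Pre_check_api_status enabled_apis api_dict api_type) := by unfold Pre_check_api_status; infer_instance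
def pvWitness_check_api_status : List String × (List (String × List (String × Bool))) × String :=
  (["maps"], [("maps", []), ("vision", [("billing_required", true)]), ("dns", [("billing_required", false)])], "core")

def Spec_check_api_status (enabled_apis : List String) (api_dict : List (String × List (String × Bool))) (api_type : String) (out : List String × List String × List String) : Prop := out = check_api_status_alt enabled_apis api_dict api_type
instance (enabled_apis : List String) (api_dict : List (String × List (String × Bool))) (api_type : String) (out : List String × List String × List String) : Decidable (Spec_check_api_status enabled_apis api_dict api_type out) := by unfold Spec_check_api_status; infer_instance

-- ===== CLAIM (what is proved, stated in full; the proofs are below) =====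
def Claim_equal_check_api_status : Prop := ∀ (enabled_apis : List String) (api_dict : List (String × List (String × Bool))) (api_type : String), Dom_check_api_status enabled_apis api_dict api_type → Pre_check_api_status enabled_apis api_dict api_type → Spec_check_api_status enabled_apis api_dict api_type (check_api_status enabled_apis api_dict api_type)

-- ===== LEMMAS AND PROOFS =====

-- The split loop from any accumulator pair appends the two filtered sublists.
theorem pvSplit_foldl {α : Type} (items : List α) (pred : α → Bool) (a b : List α) :
    items.foldl (fun acc x => if pred x then (acc.1 ++ [x], acc.2) else (acc.1, acc.2 ++ [x])) (a, b) =
    (a ++ items.filter pred, b ++ items.filter (fun x => !pred x)) := by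
  induction items generalizing a b with
  | nil => simp
  | cons hd tl ih =>
    simp only [List.foldl_cons, List.filter_cons]
    by_cases h : pred hd
    · rw [if_pos h, ih]; simp [h]
    · rw [if_neg h, ih]; simp [h]

theorem pvSplit_eq {α : Type} (items : List α) (pred : α → Bool) :
    pvSplit items pred = (items.filter pred, items.filter (fun x => !pred x)) := by
  simpa using pvSplit_foldl items pred [] []

-- A's fused fold with accumulators (a,b,c) appends the three filtered projections.
theorem check_api_status_foldl (enabled_apis : List String) (api_dict : List (String × List (String × Bool)))
    (a b c : List String) :
    api_dict.foldl (fun acc p =>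
      if enabled_apis.contains p.1 then (acc.1 ++ [p.1], acc.2.1, acc.2.2)
      else if (pvBilling p.2).getD false then (acc.1, acc.2.1 ++ [p.1], acc.2.2)
      else (acc.1, acc.2.1, acc.2.2 ++ [p.1])) (a, b, c) =
    (a ++ (api_dict.filter (fun p => enabled_apis.contains p.1)).map (·.1),
     b ++ ((api_dict.filter (fun p => !enabled_apis.contains p.1)).filter (fun p => (pvBilling p.2).getD false)).map (·.1),
     c ++ ((api_dict.filter (fun p => !enabled_apis.contains p.1)).filter (fun p => !(pvBilling p.2).getD false)).map (·.1)) := by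
  induction api_dict generalizing a b c with
  | nil => simp
  | cons hd tl ih =>
    simp only [List.foldl_cons, List.filter_cons]
    by_cases h : enabled_apis.contains hd.1
    · have h' : hd.1 ∈ enabled_apis := by simpa using h
      rw [if_pos h, ih]; simp [h']
    · have h' : hd.1 ∉ enabled_apis := by simpa using h
      by_cases hb : (pvBilling hd.2).getD false
      · rw [if_neg h, if_pos hb, ih]; simp [h', hb]
      · rw [if_neg h, if_neg hb, ih]; simp [h', hb]

-- ===== VERDICT (by name: the statement is the Claim_ definition above) =====
theorem check_api_status_spec : Claim_equal_check_api_status := by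
  intro enabled_apis api_dict api_type _ _
  unfold Spec_check_api_status check_api_status check_api_status_alt
  simp only [pvSplit_eq]
  simpa using check_api_status_foldl enabled_apis api_dict [] [] []
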